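-- pv_equiv track=rewrite | github.com/ryanparsa/kubernetes-certification | scripts/split_ref.py | _split_at
-- ===== SOURCE A (Python) =====
-- def _split_at(content: str, prefix: str) -> tuple[str, list[tuple[str, str]]]:  # type: ignore[return]
--     """Split content at lines starting with *prefix*, returning (preamble, sections)."""
--     lines = content.splitlines(keepends=True)
--     preamble_lines: list[str] = []
--     sections: list[tuple[str, str]] = []
--     current_heading: str | None = None
--     current_body: list[str] = []
--
--     for line in lines:
--         if line.startswith(prefix):
--             if current_heading is not None:
--                 sections.append((current_heading, "".join(current_body)))
--             elif current_body:
--                 preamble_lines = current_body[:]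
--             current_heading = line.rstrip("\n")
--             current_body = []
--         else:
--             current_body.append(line)
--
--     if current_heading is not None:
--         sections.append((current_heading, "".join(current_body)))
--     else:
--         preamble_lines = current_body[:]
--
--     preamble = "".join(preamble_lines).strip()
--     return preamble, sections
-- ===== SOURCE B (Python) =====
-- def _split_at(content: str, prefix: str) -> tuple[str, list[tuple[str, str]]]:
--     """Split content at lines starting with *prefix*, returning (preamble, sections)."""
--     lines = content.splitlines(keepends=True)
--     pre, rest = _span(lines, prefix)
--     return "".join(pre).strip(), _sections(rest, prefix)
--
--
-- def _span(lines, prefix):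
--     """(lines before the first heading, lines from the first heading on)."""
--     for i, line in enumerate(lines):
--         if line.startswith(prefix):
--             return lines[:i], lines[i:]
--     return lines, []
--
--
-- def _sections(rest, prefix):
--     """rest is empty or starts with a heading line; build (heading, body) pairs recursively."""
--     if not rest:
--         return []
--     body, rest2 = _span(rest[1:], prefix)
--     return [(rest[0].rstrip("\n"), "".join(body))] + _sections(rest2, prefix)
-- ===== Notes on version B (the rewrite author's own statement) =====
-- stated objective: simpler
-- what changed: Replaced A's single-pass loop carrying four pieces of mutable state (preamble lines, sections, current heading, current body) with a recursive decomposition: split off the preamble with a span at the first heading line, then peel one (heading, body) section per recursive call.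
import Mathlib
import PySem

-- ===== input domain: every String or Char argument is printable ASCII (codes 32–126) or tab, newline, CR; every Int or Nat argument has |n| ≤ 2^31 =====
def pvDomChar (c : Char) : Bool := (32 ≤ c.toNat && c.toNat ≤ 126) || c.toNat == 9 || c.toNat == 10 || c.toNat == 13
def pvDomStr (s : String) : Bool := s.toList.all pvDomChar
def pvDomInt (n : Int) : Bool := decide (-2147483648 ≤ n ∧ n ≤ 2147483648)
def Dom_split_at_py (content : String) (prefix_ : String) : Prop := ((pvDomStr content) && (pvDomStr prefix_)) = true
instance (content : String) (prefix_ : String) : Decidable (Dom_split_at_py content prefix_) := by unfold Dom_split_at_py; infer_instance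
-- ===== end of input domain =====

-- B replaces A's one-pass loop over four pieces of carried state by a recursive span
-- decomposition (preamble span, then one section per recursive call); objective: simpler.

-- ===== PORT A =====
-- Hand port of str.splitlines(keepends=True): exact on the Dom alphabet, whose only
-- line-break characters are '\n', '\r' and the pair '\r\n'.
def pvSplitKeep (cur : List Char) : List Char → List (List Char)
  | [] => if cur = [] then [] else [cur.reverse]
  | '\r' :: '\n' :: rest => (cur.reverse ++ ['\r', '\n']) :: pvSplitKeep [] rest
  | '\r' :: rest => (cur.reverse ++ ['\r']) :: pvSplitKeep [] rest
  | '\n' :: rest => (cur.reverse ++ ['\n']) :: pvSplitKeep [] rest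
  | c :: rest => pvSplitKeep (c :: cur) rest

-- Hand port of "".join(parts): plain concatenation (exact).
def pvJoin (parts : List (List Char)) : List Char := parts.foldr (· ++ ·) []

-- Hand port of line.rstrip("\n"): drop trailing '\n' characters (exact).
def pvRstripNl (cs : List Char) : List Char := (cs.reverse.dropWhile (· == '\n')).reverse

-- A's loop body: state = (preamble_lines, sections, current_heading, current_body).
def pvStepA (p : List Char)
    (st : List (List Char) × List (String × String) × Option (List Char) × List (List Char))
    (line : List Char) :
    List (List Char) × List (String × String) × Option (List Char) × List (List Char) :=
  if PySem.Chars.startswith line p then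
    match st with
    | (pre, secs, some h, body) =>
        (pre, secs ++ [(String.mk (pvRstripNl h), String.mk (pvJoin body))], some line, [])
    | (pre, secs, none, body) => (if body ≠ [] then body else pre, secs, some line, [])
  else
    match st with
    | (pre, secs, heading, body) => (pre, secs, heading, body ++ [line])

def split_at_py (content : String) (prefix_ : String) : String × (List (String × String)) :=
  let lines := pvSplitKeep [] content.toList
  match lines.foldl (pvStepA prefix_.toList) ([], [], none, []) with
  | (pre, secs, some h, body) =>
      (String.mk (PySem.Chars.strip (pvJoin pre)),
       secs ++ [(String.mk (pvRstripNl h), String.mk (pvJoin body))])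
  | (_, secs, none, body) => (String.mk (PySem.Chars.strip (pvJoin body)), secs)

-- ===== PORT B =====
-- _span(lines, prefix): split at the first heading = (takeWhile not-heading, dropWhile not-heading).
def pvNotHead (p : List Char) (line : List Char) : Bool := ! PySem.Chars.startswith line p

def pvSections (p : List Char) : List (List Char) → List (String × String)
  | [] => []
  | h :: rest =>
      (String.mk (pvRstripNl h), String.mk (pvJoin (rest.takeWhile (pvNotHead p)))) ::
        pvSections p (rest.dropWhile (pvNotHead p))
termination_by rest => rest.length
decreasing_by
  simpa using Nat.lt_succ_of_le (List.length_dropWhile_le _ _)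

def split_at_py_alt (content : String) (prefix_ : String) : String × (List (String × String)) :=
  let lines := pvSplitKeep [] content.toList
  let pre := lines.takeWhile (pvNotHead prefix_.toList)
  let rest := lines.dropWhile (pvNotHead prefix_.toList)
  (String.mk (PySem.Chars.strip (pvJoin pre)), pvSections prefix_.toList rest)

-- ===== PRECONDITION & SPEC =====
def Spec_split_at_py (content : String) (prefix_ : String) (out : String × (List (String × String))) : Prop := out = split_at_py_alt content prefix_
instance (content : String) (prefix_ : String) (out : String × (List (String × String))) : Decidable (Spec_split_at_py content prefix_ out) := by unfold Spec_split_at_py; infer_instance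

-- ===== CLAIM (what is proved, stated in full; the proofs are below) =====
def Claim_equal_split_at_py : Prop := ∀ (content : String) (prefix_ : String), Dom_split_at_py content prefix_ → Spec_split_at_py content prefix_ (split_at_py content prefix_)

-- ===== LEMMAS AND PROOFS =====

-- A's sections tail, written as a recursion mirroring the fold from a some-heading state.
def pvSecTail (p : List Char) (h : List Char) (body : List (List Char)) :
    List (List Char) → List (String × String)
  | [] => [(String.mk (pvRstripNl h), String.mk (pvJoin body))]
  | l :: ls =>
      if PySem.Chars.startswith l p then
        (String.mk (pvRstripNl h), String.mk (pvJoin body)) :: pvSecTail p l [] ls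
      else
        pvSecTail p h (body ++ [l]) ls

-- A's finalize step, named for the lemmas.
def pvFinA (st : List (List Char) × List (String × String) × Option (List Char) × List (List Char)) :
    String × (List (String × String)) :=
  match st with
  | (pre, secs, some h, body) =>
      (String.mk (PySem.Chars.strip (pvJoin pre)),
       secs ++ [(String.mk (pvRstripNl h), String.mk (pvJoin body))])
  | (_, secs, none, body) => (String.mk (PySem.Chars.strip (pvJoin body)), secs)

-- result of A's loop started in the no-heading-yet state, as a function of the span (t, d) of lines.
def pvNoneRes (p : List Char) (pre : List (List Char)) (secs : List (String × String))
    (body t d : List (List Char)) : String × (List (String × String)) :=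
  match d with
  | [] => (String.mk (PySem.Chars.strip (pvJoin (body ++ t))), secs)
  | h :: rest =>
      (String.mk (PySem.Chars.strip (pvJoin (if body ++ t ≠ [] then body ++ t else pre))),
       secs ++ pvSecTail p h [] rest)

theorem pvFoldA_some (p : List Char) : ∀ (lines : List (List Char)) pre secs h body,
    pvFinA (lines.foldl (pvStepA p) (pre, secs, some h, body))
      = (String.mk (PySem.Chars.strip (pvJoin pre)), secs ++ pvSecTail p h body lines) := by
  intro lines
  induction lines with
  | nil => intro pre secs h body; simp [pvFinA, pvSecTail]
  | cons l ls ih =>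
      intro pre secs h body
      by_cases hp : PySem.Chars.startswith l p
      · simp [List.foldl_cons, pvStepA, hp, pvSecTail, ih]
      · simp [List.foldl_cons, pvStepA, hp, pvSecTail, ih]

theorem pvSecTail_eq (p : List Char) : ∀ (lines : List (List Char)) h body,
    pvSecTail p h body lines
      = (String.mk (pvRstripNl h), String.mk (pvJoin (body ++ lines.takeWhile (pvNotHead p)))) ::
          pvSections p (lines.dropWhile (pvNotHead p)) := by
  intro lines
  induction lines with
  | nil => intro h body; simp [pvSecTail, pvSections]
  | cons l ls ih =>
      intro h body
      by_cases hp : PySem.Chars.startswith l p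
      · simp [pvSecTail, hp, pvNotHead, pvSections, ih]
      · simp [pvSecTail, hp, pvNotHead, ih]

theorem pvNoneRes_shift (p : List Char) (pre : List (List Char)) (secs : List (String × String))
    (body t d : List (List Char)) (l : List Char) :
    pvNoneRes p pre secs (body ++ [l]) t d = pvNoneRes p pre secs body (l :: t) d := by
  cases d <;> simp [pvNoneRes]

theorem pvFoldA_none (p : List Char) : ∀ (lines : List (List Char)) pre secs body,
    pvFinA (lines.foldl (pvStepA p) (pre, secs, none, body))
      = pvNoneRes p pre secs body (lines.takeWhile (pvNotHead p)) (lines.dropWhile (pvNotHead p)) := by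
  intro lines
  induction lines with
  | nil => intro pre secs body; simp [pvFinA, pvNoneRes]
  | cons l ls ih =>
      intro pre secs body
      by_cases hp : PySem.Chars.startswith l p
      · simp only [List.foldl_cons, pvStepA, hp, if_pos, List.takeWhile_cons, List.dropWhile_cons,
          pvNotHead, Bool.not_true, Bool.false_eq_true, if_false]
        rw [pvFoldA_some]
        by_cases hb : body = [] <;> simp [pvNoneRes, hb]
      · simp only [List.foldl_cons, pvStepA, hp, List.takeWhile_cons, List.dropWhile_cons,
          pvNotHead, Bool.not_false, if_true, Bool.false_eq_true, if_false]
        rw [ih, pvNoneRes_shift]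

theorem pvTakeWhile_of_dropWhile_nil {α : Type} (q : α → Bool) (l : List α)
    (h : l.dropWhile q = []) : l.takeWhile q = l := by
  have := List.takeWhile_append_dropWhile (p := q) (l := l)
  rw [h, List.append_nil] at this
  exact this

theorem split_at_py_eq_finA (content prefix_ : String) :
    split_at_py content prefix_
      = pvFinA ((pvSplitKeep [] content.toList).foldl (pvStepA prefix_.toList) ([], [], none, [])) := by
  simp only [split_at_py, pvFinA]

-- ===== VERDICT (by name: the statement is the Claim_ definition above) =====
theorem split_at_py_spec : Claim_equal_split_at_py := by
  intro content prefix_ _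
  unfold Spec_split_at_py split_at_py_alt
  rw [split_at_py_eq_finA, pvFoldA_none]
  cases hd : (pvSplitKeep [] content.toList).dropWhile (pvNotHead prefix_.toList) with
  | nil =>
      simp [pvNoneRes, hd, pvSections, pvTakeWhile_of_dropWhile_nil _ _ hd]
  | cons h rest =>
      simp only [pvNoneRes, List.nil_append, pvSecTail_eq, hd]
      rw [pvSections]
      by_cases ht : (pvSplitKeep [] content.toList).takeWhile (pvNotHead prefix_.toList) = []
      · simp [ht]
      · simp [ht]
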